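-- pv_equiv track=rewrite | github.com/Pratigya0311/Collaborative-Document-Editing-System | backend/app/services/diff_engine.py | has_conflict
-- ===== SOURCE A (Python) =====
-- def has_conflict(base: str, current: str, new: str) -> bool:
--     """
--     Check if changes from two users conflict.
--
--     Args:
--         base: Original text
--         current: Current text
--         new: New text
--
--     Returns:
--         True if conflicts exist, False otherwise
--     """
--     # Get changed regions
--     base_lines = base.split('\n')
--     current_lines = current.split('\n')
--     new_lines = new.split('\n')
--
--     # Simple conflict detection: check if same lines were modified
--     current_changes = set()
--     new_changes = set()
--
--     for i, (b, c) in enumerate(zip(base_lines, current_lines)):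
--         if b != c:
--             current_changes.add(i)
--
--     for i, (b, n) in enumerate(zip(base_lines, new_lines)):
--         if b != n:
--             new_changes.add(i)
--
--     # Conflict if both users modified the same lines
--     conflicts = current_changes.intersection(new_changes)
--     return len(conflicts) > 0
-- ===== SOURCE B (Python) =====
-- def has_conflict(base: str, current: str, new: str) -> bool:
--     """
--     Check if changes from two users conflict.
--
--     True iff at some common index i (below the length of the shortest
--     of the three line lists) the line differs from base in BOTH the
--     current and the new text.
--     """
--     base_lines = base.split('\n')
--     current_lines = current.split('\n')
--     new_lines = new.split('\n')
--     m = min(len(base_lines), len(current_lines), len(new_lines))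
--     return any(base_lines[i] != current_lines[i] and base_lines[i] != new_lines[i]
--                for i in range(m))
-- ===== Notes on version B (the rewrite author's own statement) =====
-- stated objective: simpler
-- what changed: Replaces the two set-building passes plus set intersection with a single index-based any() over range of the shortest length, checking both differences at one index at once and maintaining no data structure.
import Mathlib
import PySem

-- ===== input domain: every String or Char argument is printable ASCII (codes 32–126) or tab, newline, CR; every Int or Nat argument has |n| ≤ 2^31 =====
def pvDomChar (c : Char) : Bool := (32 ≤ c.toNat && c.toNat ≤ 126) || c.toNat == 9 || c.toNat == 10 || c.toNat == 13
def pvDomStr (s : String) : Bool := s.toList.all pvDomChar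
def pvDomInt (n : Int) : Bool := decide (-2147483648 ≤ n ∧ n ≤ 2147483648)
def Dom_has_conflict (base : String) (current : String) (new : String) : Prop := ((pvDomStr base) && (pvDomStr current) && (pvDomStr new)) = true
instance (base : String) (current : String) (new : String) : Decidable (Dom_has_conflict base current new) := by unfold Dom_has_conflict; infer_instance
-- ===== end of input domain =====

-- B replaces A's two set-building passes plus set intersection by one index-based any() over range of the shortest length (simpler; no data structure maintained).

-- ===== PORT A =====
-- base.split('\n') with the non-empty literal separator: split? is always `some` here, so .getD [] is exact
-- for i, (b, x) in enumerate(zip(base_lines, other_lines)): if b != x: changes.add(i)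
def pvChangesLoop : List (String × String) → Int → PySem.Set Int → PySem.Set Int
  | [], _, s => s
  | (b, x) :: t, i, s => pvChangesLoop t (i + 1) (if b ≠ x then PySem.Set.add s i else s)

def has_conflict (base : String) (current : String) (new : String) : Bool :=
  let base_lines : List String := (PySem.Str.split? base "\n").getD []
  let current_lines : List String := (PySem.Str.split? current "\n").getD []
  let new_lines : List String := (PySem.Str.split? new "\n").getD []
  let current_changes := pvChangesLoop (base_lines.zip current_lines) 0 PySem.Set.empty
  let new_changes := pvChangesLoop (base_lines.zip new_lines) 0 PySem.Set.empty
  let conflicts := PySem.Set.inter current_changes new_changes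
  decide (0 < PySem.Set.len conflicts)

-- ===== PORT B =====
-- m = min(len(bl), len(cl), len(nl)); any(bl[i] != cl[i] and bl[i] != nl[i] for i in range(m))
-- indices drawn from range(m) are in range for all three lists, so .getD i "" is exact for bl[i]
def has_conflict_alt (base : String) (current : String) (new : String) : Bool :=
  let bl : List String := (PySem.Str.split? base "\n").getD []
  let cl : List String := (PySem.Str.split? current "\n").getD []
  let nl : List String := (PySem.Str.split? new "\n").getD []
  let m : Nat := min (min bl.length cl.length) nl.length
  (List.range m).any (fun i => bl.getD i "" != cl.getD i "" && bl.getD i "" != nl.getD i "")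

-- ===== PRECONDITION & SPEC =====
def Spec_has_conflict (base : String) (current : String) (new : String) (out : Bool) : Prop := out = has_conflict_alt base current new
instance (base : String) (current : String) (new : String) (out : Bool) : Decidable (Spec_has_conflict base current new out) := by unfold Spec_has_conflict; infer_instance

-- ===== CLAIM (what is proved, stated in full; the proofs are below) =====
def Claim_equal_has_conflict : Prop := ∀ (base : String) (current : String) (new : String), Dom_has_conflict base current new → Spec_has_conflict base current new (has_conflict base current new)

-- ===== LEMMAS AND PROOFS =====

-- proof-side reformulation of A's result as a single zipped scan
def pvAltLoop : List (String × String × String) → Bool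
  | [] => false
  | (b, c, n) :: t => if b ≠ c ∧ b ≠ n then true else pvAltLoop t

theorem mem_pvChangesLoop_elim {ps : List (String × String)} {i x : Int} {s : PySem.Set Int}
    (h : x ∈ pvChangesLoop ps i s) : x ∈ s ∨ i ≤ x := by
  induction ps generalizing i s with
  | nil => exact Or.inl h
  | cons p t ih =>
    obtain ⟨b, c⟩ := p
    simp only [pvChangesLoop] at h
    rcases ih h with hx | hx
    · split at hx
      · rcases (PySem.Set.mem_add _ _ _).1 hx with hx | hx
        · exact Or.inl hx
        · exact Or.inr (le_of_eq hx.symm)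
      · exact Or.inl hx
    · exact Or.inr (by omega)

theorem mem_pvChangesLoop_of_mem {ps : List (String × String)} {i x : Int} {s : PySem.Set Int}
    (h : x ∈ s) : x ∈ pvChangesLoop ps i s := by
  induction ps generalizing i s with
  | nil => exact h
  | cons p t ih =>
    obtain ⟨b, c⟩ := p
    simp only [pvChangesLoop]
    apply ih
    split
    · exact (PySem.Set.mem_add _ _ _).2 (Or.inl h)
    · exact h

theorem pv_inter_pos_iff (s t : PySem.Set Int) :
    decide (0 < PySem.Set.len (PySem.Set.inter s t)) = true ↔ ∃ x, x ∈ s ∧ x ∈ t := by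
  rw [decide_eq_true_iff]
  constructor
  · intro h
    have hne : PySem.Set.inter s t ≠ [] := by
      intro hnil
      simp [PySem.Set.len, hnil] at h
    obtain ⟨x, hx⟩ := List.exists_mem_of_ne_nil _ hne
    exact ⟨x, (PySem.Set.mem_inter _ _ _).1 hx⟩
  · intro ⟨x, hx⟩
    have hmem : x ∈ PySem.Set.inter s t := (PySem.Set.mem_inter _ _ _).2 hx
    have : PySem.Set.inter s t ≠ [] := by intro hnil; simp [hnil] at hmem
    have hlen : 0 < (PySem.Set.inter s t).length := List.length_pos_of_ne_nil this
    simp [PySem.Set.len]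
    omega

theorem pv_main (bl cl nl : List String) (i : Int) (cs ns : PySem.Set Int)
    (hc : ∀ x ∈ cs, x < i) (hn : ∀ x ∈ ns, x < i)
    (hd : ∀ x ∈ cs, x ∉ ns) :
    decide (0 < PySem.Set.len (PySem.Set.inter (pvChangesLoop (bl.zip cl) i cs)
      (pvChangesLoop (bl.zip nl) i ns))) = pvAltLoop (bl.zip (cl.zip nl)) := by
  induction bl generalizing cl nl i cs ns with
  | nil =>
    simp only [List.zip_nil_left, pvChangesLoop, pvAltLoop]
    rw [Bool.eq_false_iff]
    intro h
    obtain ⟨x, hxc, hxn⟩ := (pv_inter_pos_iff _ _).1 h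
    exact hd x hxc hxn
  | cons b bt ih =>
    cases cl with
    | nil =>
      simp only [List.zip_nil_left, List.zip_nil_right, pvChangesLoop, pvAltLoop]
      rw [Bool.eq_false_iff]
      intro h
      obtain ⟨x, hxc, hxn⟩ := (pv_inter_pos_iff _ _).1 h
      rcases mem_pvChangesLoop_elim hxn with hx | hx
      · exact hd x hxc hx
      · exact absurd (hc x hxc) (by omega)
    | cons c ct =>
      cases nl with
      | nil =>
        simp only [List.zip_nil_right, pvChangesLoop, pvAltLoop]
        rw [Bool.eq_false_iff]
        intro h
        obtain ⟨x, hxc, hxn⟩ := (pv_inter_pos_iff _ _).1 h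
        rcases mem_pvChangesLoop_elim hxc with hx | hx
        · exact hd x hx hxn
        · exact absurd (hn x hxn) (by omega)
      | cons n nt =>
        simp only [List.zip_cons_cons, pvChangesLoop, pvAltLoop]
        by_cases hbc : b = c
        · -- b = c: current set unchanged this step; b ≠ c ∧ b ≠ n is false
          simp only [if_neg (show ¬ b ≠ c by simp [hbc]), if_neg (show ¬ (b ≠ c ∧ b ≠ n) from fun h => h.1 hbc)]
          by_cases hbn : b = n
          · simp only [if_neg (show ¬ b ≠ n by simp [hbn])]
            exact ih ct nt (i + 1) cs ns (fun x hx => by have := hc x hx; omega)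
              (fun x hx => by have := hn x hx; omega) hd
          · simp only [if_pos hbn]
            refine ih ct nt (i + 1) cs (PySem.Set.add ns i)
              (fun x hx => by have := hc x hx; omega)
              (fun x hx => by
                rcases (PySem.Set.mem_add _ _ _).1 hx with hx | hx
                · have := hn x hx; omega
                · omega)
              (fun x hx hmem => by
                rcases (PySem.Set.mem_add _ _ _).1 hmem with hm | hm
                · exact hd x hx hm
                · exact absurd (hc x hx) (by omega))
        · simp only [if_pos hbc]
          by_cases hbn : b = n
          · -- only the current set gains i
            simp only [if_neg (show ¬ b ≠ n by simp [hbn]), if_neg (show ¬ (b ≠ c ∧ b ≠ n) from fun h => h.2 hbn)]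
            refine ih ct nt (i + 1) (PySem.Set.add cs i) ns
              (fun x hx => by
                rcases (PySem.Set.mem_add _ _ _).1 hx with hx | hx
                · have := hc x hx; omega
                · omega)
              (fun x hx => by have := hn x hx; omega)
              (fun x hx hmem => by
                rcases (PySem.Set.mem_add _ _ _).1 hx with hm | hm
                · exact hd x hm hmem
                · exact absurd (hn x hmem) (by omega))
          · -- both sets gain i: conflict; the zipped scan returns true
            simp only [if_pos hbn, if_pos (show b ≠ c ∧ b ≠ n from ⟨hbc, hbn⟩)]
            apply (pv_inter_pos_iff _ _).2
            exact ⟨i, mem_pvChangesLoop_of_mem ((PySem.Set.mem_add _ _ _).2 (Or.inr rfl)),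
              mem_pvChangesLoop_of_mem ((PySem.Set.mem_add _ _ _).2 (Or.inr rfl))⟩

-- the zipped scan equals B's index-based any over range(min of the three lengths)
theorem pv_zip_eq_range (bl cl nl : List String) :
    pvAltLoop (bl.zip (cl.zip nl)) =
      (List.range (min (min bl.length cl.length) nl.length)).any
        (fun i => bl.getD i "" != cl.getD i "" && bl.getD i "" != nl.getD i "") := by
  rw [Bool.eq_iff_iff]
  have hscan : ∀ (l : List (String × String × String)),
      pvAltLoop l = true ↔ ∃ p ∈ l, p.1 ≠ p.2.1 ∧ p.1 ≠ p.2.2 := by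
    intro l
    induction l with
    | nil => simp [pvAltLoop]
    | cons h t ih =>
      obtain ⟨b, c, n⟩ := h
      by_cases hb : b ≠ c ∧ b ≠ n
      · simp [pvAltLoop, hb]
      · simp only [pvAltLoop, if_neg hb, ih, List.mem_cons]
        constructor
        · rintro ⟨p, hp, h1, h2⟩; exact ⟨p, Or.inr hp, h1, h2⟩
        · rintro ⟨p, hp | hp, h1, h2⟩
          · subst hp; exact absurd ⟨h1, h2⟩ hb
          · exact ⟨p, hp, h1, h2⟩
  rw [hscan, List.any_eq_true]
  constructor
  · rintro ⟨p, hp, h1, h2⟩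
    obtain ⟨i, hi, hget⟩ := List.mem_iff_getElem.1 hp
    simp only [List.length_zip, lt_min_iff] at hi
    have hp' : p = (bl[i], cl[i], nl[i]) := by
      rw [← hget]; simp [List.getElem_zip]
    subst hp'
    refine ⟨i, List.mem_range.2 (by omega), ?_⟩
    simp only [List.getD_eq_getElem _ _ (by omega : i < bl.length),
      List.getD_eq_getElem _ _ (by omega : i < cl.length),
      List.getD_eq_getElem _ _ (by omega : i < nl.length),
      Bool.and_eq_true, bne_iff_ne]
    exact ⟨h1, h2⟩
  · rintro ⟨i, hi, h⟩
    have hi' := List.mem_range.1 hi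
    have hb : i < bl.length := by omega
    have hc : i < cl.length := by omega
    have hn : i < nl.length := by omega
    simp only [List.getD_eq_getElem _ _ hb, List.getD_eq_getElem _ _ hc,
      List.getD_eq_getElem _ _ hn, Bool.and_eq_true, bne_iff_ne] at h
    refine ⟨(bl[i], cl[i], nl[i]), ?_, h.1, h.2⟩
    exact List.mem_iff_getElem.2 ⟨i, by simp [List.length_zip]; omega,
      by simp [List.getElem_zip]⟩

-- ===== VERDICT (by name: the statement is the Claim_ definition above) =====
theorem has_conflict_spec : Claim_equal_has_conflict := by
  intro base current new _
  unfold Spec_has_conflict has_conflict has_conflict_alt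
  rw [pv_main _ _ _ 0 PySem.Set.empty PySem.Set.empty
    (by intro x hx; simp [PySem.Set.empty] at hx)
    (by intro x hx; simp [PySem.Set.empty] at hx)
    (by intro x hx; simp [PySem.Set.empty] at hx)]
  exact pv_zip_eq_range _ _ _
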